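-- pv_equiv track=rewrite | github.com/Apfelvater/Proseminar-BWT | bwt_tools_lib.py | standard_permutation
-- ===== SOURCE A (Python) =====
-- def standard_permutation(u : str) -> list[int]:
--     v = list(u)
--     v.sort()
--     pi = []
--     j = 0
--     # Outer loop: iterating through all letters sorted
--     while (j < len(v)):
--         # Inner loop: iterating through all letters of word u
--         for i in range(len(u)):
--             if u[i] == v[j]:
--                 pi += [i]
--                 j += 1
--                 if j >= len(v):
--                     return pi
--                 # Symbol is changing
--                 if v[j] != v[j-1]:
--                     break
--     return pi
-- ===== SOURCE B (Python) =====
-- def standard_permutation(u : str) -> list[int]: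
--     buckets = {}
--     for i, c in enumerate(u):
--         buckets.setdefault(c, []).append(i)
--     pi = []
--     for c in sorted(buckets):
--         pi += buckets[c]
--     return pi
-- ===== Notes on version B (the rewrite author's own statement) =====
-- stated objective: faster
-- what changed: A's nested scan (one full re-scan of u per distinct sorted symbol, with break/return control flow) is replaced by a single bucketing pass over enumerate(u) into a char->indices dict plus a concatenation over the sorted keys.
import Mathlib
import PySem

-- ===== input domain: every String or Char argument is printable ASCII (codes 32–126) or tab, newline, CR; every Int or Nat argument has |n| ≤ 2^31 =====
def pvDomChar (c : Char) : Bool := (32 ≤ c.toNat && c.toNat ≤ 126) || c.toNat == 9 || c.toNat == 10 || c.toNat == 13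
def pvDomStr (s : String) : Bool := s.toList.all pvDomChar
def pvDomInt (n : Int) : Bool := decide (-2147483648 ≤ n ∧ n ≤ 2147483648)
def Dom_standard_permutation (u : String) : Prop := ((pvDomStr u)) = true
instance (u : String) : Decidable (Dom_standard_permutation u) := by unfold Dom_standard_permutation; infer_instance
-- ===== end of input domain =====

-- B replaces A's nested scan-and-match (one full re-scan of u per distinct sorted symbol) by one
-- bucketing pass over enumerate(u) plus a concatenation over the sorted bucket keys (objective: faster).

-- ===== PORT A =====
-- inner for-loop of A: scans i over range(len u); returns (pi, j, done) where done=true means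
-- the Python 'return pi' fired; falling off the end and 'break' both return done=false.
def spInner (u v : List Char) (pi : List Int) (j i : Nat) : List Int × Nat × Bool :=
  if _h : i < u.length then
    if u.getD i ' ' == v.getD j ' ' then
      let pi' := pi ++ [(i : Int)]
      let j' := j + 1
      if v.length ≤ j' then (pi', j', true)
      else if v.getD j' ' ' != v.getD (j' - 1) ' ' then (pi', j', false)
      else spInner u v pi' j' (i + 1)
    else spInner u v pi j (i + 1)
  else (pi, j, false)
termination_by u.length - i

-- outer while-loop of A; fuel (v.length + 1) is an upper bound on its iterations, proved
-- sufficient below (each iteration advances j by at least one since v is a permutation of u)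
def spOuter (u v : List Char) (pi : List Int) (j : Nat) : Nat → List Int
  | 0 => pi
  | fuel + 1 =>
    if j < v.length then
      match spInner u v pi j 0 with
      | (pi', j', done) => if done then pi' else spOuter u v pi' j' fuel
    else pi

def standard_permutation (u : String) : List Int :=
  let v := PySem.List.sorted u.toList (fun x => x)
  spOuter u.toList v [] 0 (v.length + 1)

-- ===== PORT B =====
def standard_permutation_alt (u : String) : List Int :=
  let buckets : PySem.Dict Char (List Int) :=
    (PySem.List.enumerate u.toList).foldl
      (fun d p => d.modify p.2 [] (· ++ [p.1])) PySem.Dict.empty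
  (PySem.List.sorted buckets.keys (fun x => x)).foldl
    (fun pi c => pi ++ buckets.getD c []) []

-- ===== PRECONDITION & SPEC =====
def Spec_standard_permutation (u : String) (out : List Int) : Prop := out = standard_permutation_alt u
instance (u : String) (out : List Int) : Decidable (Spec_standard_permutation u out) := by unfold Spec_standard_permutation; infer_instance

-- ===== CLAIM (what is proved, stated in full; the proofs are below) =====
def Claim_equal_standard_permutation : Prop := ∀ (u : String), Dom_standard_permutation u → Spec_standard_permutation u (standard_permutation u)

-- ===== LEMMAS AND PROOFS =====

-- the ascending list of positions (as Int, offset by i) at which c occurs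
def spOcc (c : Char) : Nat → List Char → List Int
  | _, [] => []
  | i, x :: t => (if x == c then [(i : Int)] else []) ++ spOcc c (i + 1) t

theorem spOcc_length (c : Char) : ∀ (i : Nat) (l : List Char), (spOcc c i l).length = l.count c := by
  intro i l
  induction l generalizing i with
  | nil => rfl
  | cons x t ih =>
    by_cases h : x = c <;>
      simp [spOcc, ih, h, beq_iff_eq]

theorem spOcc_enum (c : Char) : ∀ (l : List Char) (i : Nat),
    ((PySem.List.enumerate l (i : Int)).filter (fun p => p.2 == c)).map (fun p => p.1)
      = spOcc c i l := by
  intro l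
  induction l with
  | nil => intro i; rfl
  | cons x t ih =>
    intro i
    have ih' := ih (i + 1)
    rw [show ((i + 1 : Nat) : Int) = ((i : Int) + 1) by push_cast; ring] at ih'
    by_cases h : x = c <;>
      simp [PySem.List.enumerate_cons, spOcc, ih', h]

theorem spInner_spec (u v : List Char) (c : Char) : ∀ (n i : Nat), u.length - i = n →
    ∀ (pi : List Int) (j k : Nat),
    (∀ t, t < k → v.getD (j + t) ' ' = c) →
    (v.length = j + k ∨ (j + k < v.length ∧ v.getD (j + k) ' ' ≠ c)) →
    k = (spOcc c i (u.drop i)).length →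
    1 ≤ k →
    spInner u v pi j i = (pi ++ spOcc c i (u.drop i), j + k, decide (v.length ≤ j + k)) := by
  intro n
  induction n with
  | zero =>
    intro i hn pi j k _ _ hk hk1
    have hge : u.length ≤ i := by omega
    rw [List.drop_eq_nil_iff.mpr hge] at hk
    simp [spOcc] at hk
    omega
  | succ n ihn =>
    intro i hn pi j k hseg hbrk hk hk1
    have hi : i < u.length := by omega
    have hvj : v.getD j ' ' = c := by simpa using hseg 0 hk1
    have hui : u.getD i ' ' = u[i] := List.getD_eq_getElem u ' ' hi
    have hdrop : u.drop i = u[i] :: u.drop (i + 1) := List.drop_eq_getElem_cons hi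
    rw [spInner, dif_pos hi, hui, hvj]
    by_cases hc : u[i] = c
    · rw [if_pos (by simpa using hc)]
      rw [hdrop] at hk ⊢
      rw [show spOcc c i (u[i] :: u.drop (i + 1))
            = (i : Int) :: spOcc c (i + 1) (u.drop (i + 1)) by simp [spOcc, hc]] at hk ⊢
      have hkk : k = (spOcc c (i + 1) (u.drop (i + 1))).length + 1 := by
        simpa using hk
      by_cases hk0 : (spOcc c (i + 1) (u.drop (i + 1))).length = 0
      · -- last occurrence of c in u: k = 1, the group ends at j + 1
        have hk1' : k = 1 := by omega
        subst hk1'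
        rw [List.length_eq_zero_iff.mp hk0]
        rcases hbrk with hl | ⟨hlt, hne⟩
        · rw [if_pos (by omega)]
          simp
          omega
        · rw [if_neg (by omega)]
          rw [if_pos (by
            have h11 : j + 1 - 1 = j := rfl
            rw [h11, hvj]
            simpa [bne_iff_ne] using hne)]
          simp
          omega
      · -- more copies of c follow: v[j+1] = v[j], the inner loop continues
        have hk2 : 2 ≤ k := by omega
        have hlen : j + k ≤ v.length := by rcases hbrk with h | ⟨h, _⟩ <;> omega
        rw [if_neg (by omega)]
        have hv1 : v.getD (j + 1) ' ' = c := hseg 1 (by omega)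
        rw [if_neg (by
          have h11 : j + 1 - 1 = j := rfl
          rw [h11, hv1, hvj]
          simp)]
        have := ihn (i + 1) (by omega) (pi ++ [(i : Int)]) (j + 1)
          ((spOcc c (i + 1) (u.drop (i + 1))).length)
          (fun t ht => by
            rw [show j + 1 + t = j + (t + 1) by omega]
            exact hseg (t + 1) (by omega))
          (by
            rcases hbrk with h | ⟨h1, h2⟩
            · left; omega
            · right
              refine ⟨by omega, ?_⟩
              have : j + 1 + (spOcc c (i + 1) (u.drop (i + 1))).length = j + k := by omega
              rw [this]; exact h2)
          rfl (by omega)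
        rw [this]
        refine congrArg₂ _ (by simp) (congrArg₂ _ (by omega) ?_)
        have : j + 1 + (spOcc c (i + 1) (u.drop (i + 1))).length = j + k := by omega
        rw [this]
    · rw [if_neg (by simpa using hc)]
      have hocc : spOcc c i (u.drop i) = spOcc c (i + 1) (u.drop (i + 1)) := by
        rw [hdrop]; simp [spOcc, hc]
      rw [hocc] at hk ⊢
      exact ihn (i + 1) (by omega) pi j k hseg hbrk hk hk1

-- a nonempty family of character groups cannot concatenate to nil
theorem flatMap_groups_ne_nil (u : List Char) (c : Char) (rest : List Char) (hc : c ∈ u) :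
    (c :: rest).flatMap (fun c => List.replicate (u.count c) c) ≠ [] := by
  have hk : 0 < u.count c := List.count_pos_iff.mpr hc
  intro h
  rw [List.flatMap_cons] at h
  rcases List.append_eq_nil_iff.mp h with ⟨h1, _⟩
  rw [List.replicate_eq_nil_iff] at h1
  omega

theorem spOuter_spec (u v : List Char) : ∀ (ds : List Char) (j : Nat) (pi : List Int) (fuel : Nat),
    v.drop j = ds.flatMap (fun c => List.replicate (u.count c) c) →
    (∀ c ∈ ds, c ∈ u) →
    ds.Pairwise (· < ·) →
    ds.length < fuel →
    spOuter u v pi j fuel = pi ++ ds.flatMap (fun c => spOcc c 0 u) := by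
  intro ds
  induction ds with
  | nil =>
    intro j pi fuel hdrop _ _ hfuel
    have hj : v.length ≤ j := List.drop_eq_nil_iff.mp (by simpa using hdrop)
    obtain ⟨f, rfl⟩ : ∃ f, fuel = f + 1 := ⟨fuel - 1, by omega⟩
    simp [spOuter, Nat.not_lt.mpr hj]
  | cons c rest ih =>
    intro j pi fuel hdrop hmem hpw hfuel
    have hcu : c ∈ u := hmem c List.mem_cons_self
    set k := u.count c with hkdef
    have hk1 : 1 ≤ k := List.count_pos_iff.mpr hcu
    have hdrop' : v.drop j = List.replicate k c ++ rest.flatMap (fun c => List.replicate (u.count c) c) := by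
      simpa [List.flatMap_cons] using hdrop
    have hlen : v.length - j = k + (rest.flatMap (fun c => List.replicate (u.count c) c)).length := by
      have := congrArg List.length hdrop'
      simpa using this
    have hjlt : j < v.length := by
      rcases Nat.lt_or_ge j v.length with h | h
      · exact h
      · exfalso
        apply flatMap_groups_ne_nil u c rest hcu
        rw [← hdrop]
        exact List.drop_eq_nil_iff.mpr h
    have hseg : ∀ t, t < k → v.getD (j + t) ' ' = c := by
      intro t ht
      have h0 : (v.drop j)[t]? = some c := by
        rw [hdrop', List.getElem?_append_left (by simpa using ht), List.getElem?_replicate,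
          if_pos ht]
      rw [List.getElem?_drop] at h0
      rw [List.getD_eq_getElem?_getD, h0]
      rfl
    have hdd : v.drop (j + k) = rest.flatMap (fun c => List.replicate (u.count c) c) := by
      rw [← List.drop_drop, hdrop']
      simp
    have hbrk : v.length = j + k ∨ (j + k < v.length ∧ v.getD (j + k) ' ' ≠ c) := by
      rcases htail : rest.flatMap (fun c => List.replicate (u.count c) c) with _ | ⟨d, tl⟩
      · left
        rw [htail] at hlen
        simp only [List.length_nil] at hlen
        omega
      · right
        have hdmem : d ∈ rest.flatMap (fun c => List.replicate (u.count c) c) := by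
          rw [htail]; exact List.mem_cons_self
        obtain ⟨c', hc', hd⟩ := List.mem_flatMap.mp hdmem
        have hdc : c < d := by
          rw [List.eq_of_mem_replicate hd]
          exact (List.pairwise_cons.mp hpw).1 c' hc'
        refine ⟨by rw [htail] at hlen; simp only [List.length_cons] at hlen; omega, ?_⟩
        have h0 : (v.drop (j + k))[0]? = some d := by rw [hdd, htail]; rfl
        rw [List.getElem?_drop] at h0
        simp only [Nat.add_zero] at h0
        rw [List.getD_eq_getElem?_getD, h0]
        simp only [Option.getD_some]
        exact fun h => absurd h.symm (ne_of_lt hdc)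
    obtain ⟨f, rfl⟩ : ∃ f, fuel = f + 1 := ⟨fuel - 1, by omega⟩
    have hinner := spInner_spec u v c (u.length - 0) 0 rfl pi j k hseg hbrk
      (by rw [List.drop_zero, spOcc_length]) hk1
    rw [List.drop_zero] at hinner
    rw [show spOuter u v pi j (f + 1)
        = if j < v.length then
            match spInner u v pi j 0 with
            | (pi', j', done) => if done then pi' else spOuter u v pi' j' f
          else pi from rfl,
      if_pos hjlt, hinner]
    show (if decide (v.length ≤ j + k) = true then pi ++ spOcc c 0 u
        else spOuter u v (pi ++ spOcc c 0 u) (j + k) f) = _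
    rcases htail : rest.flatMap (fun c => List.replicate (u.count c) c) with _ | ⟨d, tl⟩
    · -- last group: the Python 'return pi' fires, and rest must be empty
      have hle : v.length ≤ j + k := by
        rw [htail] at hlen; simp only [List.length_nil] at hlen; omega
      rw [if_pos (decide_eq_true hle)]
      have hrest : rest = [] := by
        cases rest with
        | nil => rfl
        | cons c'' rest' =>
          exact absurd htail (flatMap_groups_ne_nil u c'' rest' (hmem c'' (by simp)))
      rw [hrest]
      simp
    · have hlt : j + k < v.length := by
        rw [htail] at hlen; simp only [List.length_cons] at hlen; omega
      rw [if_neg (by simp; omega)]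
      rw [ih (j + k) (pi ++ spOcc c 0 u) f (by rw [hdd])
        (fun c' hc' => hmem c' (List.mem_cons_of_mem c hc'))
        (List.pairwise_cons.mp hpw).2 (by simp at hfuel; omega)]
      simp [List.flatMap_cons]

-- sum of per-character counts over a duplicate-free list of characters
theorem sum_map_count (a : Char) (n : Char → Nat) : ∀ (ds : List Char), ds.Nodup →
    (ds.map (fun c => List.count a (List.replicate (n c) c))).sum
      = if a ∈ ds then n a else 0 := by
  intro ds
  induction ds with
  | nil => intro _; simp
  | cons c rest ih =>
    intro hnd
    rw [List.map_cons, List.sum_cons, ih hnd.of_cons, List.count_replicate]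
    by_cases hca : c = a
    · subst hca
      have : c ∉ rest := (List.nodup_cons.mp hnd).1
      simp [this]
    · simp [hca, List.mem_cons, Ne.symm hca]

theorem sorted_group (l : List Char) :
    PySem.List.sorted l (fun x => x)
      = (PySem.List.sorted (PySem.Set.ofList l) (fun x => x)).flatMap
          (fun c => List.replicate (l.count c) c) := by
  have hpw : (PySem.List.sorted (PySem.Set.ofList l) (fun x => x)).Pairwise (· < ·) :=
    PySem.List.sorted_ofList_pairwise_lt l
  have hnd : (PySem.List.sorted (PySem.Set.ofList l) (fun x => x)).Nodup :=
    hpw.imp ne_of_lt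
  have hmem : ∀ c : Char, c ∈ PySem.List.sorted (PySem.Set.ofList l) (fun x => x) ↔ c ∈ l := by
    intro c
    rw [PySem.List.mem_sorted, PySem.Set.mem_ofList]
  apply PySem.List.sorted_id_eq_of_perm_of_pairwise
  · rw [List.perm_iff_count]
    intro a
    rw [List.count_flatMap]
    have : (List.map (List.count a ∘ fun c => List.replicate (l.count c) c)
        (PySem.List.sorted (PySem.Set.ofList l) fun x => x)).sum
        = if a ∈ PySem.List.sorted (PySem.Set.ofList l) (fun x => x) then l.count a else 0 :=
      sum_map_count a (fun c => l.count c) _ hnd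
    rw [this]
    by_cases ha : a ∈ l
    · rw [if_pos ((hmem a).mpr ha)]
    · rw [if_neg (fun h => ha ((hmem a).mp h)), List.count_eq_zero_of_not_mem ha]
  · rw [List.pairwise_flatMap]
    refine ⟨fun a _ => ?_, ?_⟩
    · rw [List.pairwise_replicate]
      exact Or.inr le_rfl
    · refine hpw.imp_of_mem ?_
      intro a b _ _ hab x hx y hy
      rw [List.eq_of_mem_replicate hx, List.eq_of_mem_replicate hy]
      exact le_of_lt hab

-- each group is nonempty, so there are at least as many letters as groups
theorem length_le_flatMap (g : Char → List Char) : ∀ (ds : List Char),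
    (∀ c ∈ ds, 1 ≤ (g c).length) → ds.length ≤ (ds.flatMap g).length := by
  intro ds
  induction ds with
  | nil => intro _; simp
  | cons c rest ih =>
    intro h
    rw [List.flatMap_cons, List.length_append, List.length_cons]
    have h1 := h c List.mem_cons_self
    have h2 := ih (fun c' hc' => h c' (List.mem_cons_of_mem c hc'))
    omega

theorem standard_permutation_common (u : String) :
    standard_permutation u
      = (PySem.List.sorted (PySem.Set.ofList u.toList) (fun x => x)).flatMap
          (fun c => spOcc c 0 u.toList) := by
  unfold standard_permutation
  set ds := PySem.List.sorted (PySem.Set.ofList u.toList) (fun x => x) with hds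
  have hpw : ds.Pairwise (· < ·) := PySem.List.sorted_ofList_pairwise_lt u.toList
  have hmem : ∀ c : Char, c ∈ ds ↔ c ∈ u.toList := by
    intro c
    rw [hds, PySem.List.mem_sorted, PySem.Set.mem_ofList]
  have hv : PySem.List.sorted u.toList (fun x => x)
      = ds.flatMap (fun c => List.replicate (u.toList.count c) c) := sorted_group u.toList
  have hfuel : ds.length < (PySem.List.sorted u.toList (fun x => x)).length + 1 := by
    have := length_le_flatMap (fun c => List.replicate (u.toList.count c) c) ds
      (fun c hc => by
        simp only [List.length_replicate]
        exact List.count_pos_iff.mpr ((hmem c).mp hc))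
    rw [← hv] at this
    omega
  rw [spOuter_spec u.toList (PySem.List.sorted u.toList (fun x => x)) ds 0 []
    ((PySem.List.sorted u.toList (fun x => x)).length + 1) (by rw [List.drop_zero, hv])
    (fun c hc => (hmem c).mp hc) hpw hfuel, List.nil_append]

theorem alt_common (u : String) :
    standard_permutation_alt u
      = (PySem.List.sorted (PySem.Set.ofList u.toList) (fun x => x)).flatMap
          (fun c => spOcc c 0 u.toList) := by
  unfold standard_permutation_alt
  have hfold : (PySem.List.enumerate u.toList).foldl
      (fun d p => d.modify p.2 [] (· ++ [p.1])) PySem.Dict.empty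
      = ((PySem.List.enumerate u.toList).map (fun p => (p.2, p.1))).foldl
          (fun d p => d.modify p.1 [] (· ++ [p.2])) PySem.Dict.empty := by
    rw [List.foldl_map]
  have hkeys : ((PySem.List.enumerate u.toList).foldl
      (fun d p => d.modify p.2 [] (· ++ [p.1])) PySem.Dict.empty).keys
      = PySem.Set.ofList u.toList := by
    rw [PySem.Dict.keys_foldl_modify_key (PySem.List.enumerate u.toList) (fun p => p.2) []
      (fun _ p => (· ++ [p.1])) PySem.Dict.empty, PySem.List.map_snd_enumerate]
    rfl
  have hgetD : ∀ c : Char, ((PySem.List.enumerate u.toList).foldl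
      (fun d p => d.modify p.2 [] (· ++ [p.1])) PySem.Dict.empty).getD c []
      = spOcc c 0 u.toList := by
    intro c
    rw [hfold, PySem.Dict.getD_foldl_modify_append, List.filter_map, List.map_map]
    have h0 : ((0 : Nat) : Int) = (0 : Int) := rfl
    rw [← h0, ← spOcc_enum c u.toList 0]
    rfl
  rw [PySem.List.foldl_append_eq_flatMap, hkeys, List.nil_append]
  exact List.flatMap_congr (fun c _ => hgetD c)

-- ===== VERDICT (by name: the statement is the Claim_ definition above) =====
theorem standard_permutation_spec : Claim_equal_standard_permutation := by
  intro u _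
  unfold Spec_standard_permutation
  rw [standard_permutation_common, alt_common]
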